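-- pv_equiv track=rewrite | github.com/aleksandrlisitcyn/testflight1 | tools/update_changelog.py | replace_unreleased
-- ===== SOURCE A (Python) =====
-- from typing import Dict, List
--
-- def replace_unreleased(contents: str, new_block: List[str]) -> str:
--     lines = contents.splitlines()
--     try:
--         start = next(i for i, line in enumerate(lines) if line.strip().lower() == "## [unreleased]")
--     except StopIteration:
--         # If the marker is missing, append it at the end.
--         if lines and lines[-1] != "":
--             lines.append("")
--         lines.append("## [Unreleased]")
--         start = len(lines) - 1
--
--     end = next((i for i in range(start + 1, len(lines)) if lines[i].startswith("## [")), len(lines))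
--     new_lines = lines[: start + 1]
--     new_lines.append("")
--     new_lines.extend(new_block)
--     new_lines.extend(lines[end:])
--     return "\n".join(new_lines).rstrip() + "\n"
-- ===== SOURCE B (Python) =====
-- def replace_unreleased(contents: str, new_block):
--     # One forward pass with copy / emit / skip phases instead of two index scans plus slicing.
--     out = []
--     it = iter(contents.splitlines())
--     found = False
--     for line in it:
--         out.append(line)
--         if line.strip().lower() == "## [unreleased]":
--             found = True
--             break
--     if not found:
--         if out and out[-1] != "":
--             out.append("")
--         out.append("## [Unreleased]")
--     out.append("")
--     out.extend(new_block)
--     if found: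
--         skipping = True
--         for line in it:
--             if skipping:
--                 if line.startswith("## ["):
--                     skipping = False
--                     out.append(line)
--             else:
--                 out.append(line)
--     return "\n".join(out).rstrip() + "\n"
-- ===== Notes on version B (the rewrite author's own statement) =====
-- stated objective: alternative
-- what changed: A locates the marker index and the next-header index with two separate scans and assembles the result from list slices; B makes a single forward pass over the lines with copy/emit/skip phases (a small state machine) and never indexes or slices.
import Mathlib
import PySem

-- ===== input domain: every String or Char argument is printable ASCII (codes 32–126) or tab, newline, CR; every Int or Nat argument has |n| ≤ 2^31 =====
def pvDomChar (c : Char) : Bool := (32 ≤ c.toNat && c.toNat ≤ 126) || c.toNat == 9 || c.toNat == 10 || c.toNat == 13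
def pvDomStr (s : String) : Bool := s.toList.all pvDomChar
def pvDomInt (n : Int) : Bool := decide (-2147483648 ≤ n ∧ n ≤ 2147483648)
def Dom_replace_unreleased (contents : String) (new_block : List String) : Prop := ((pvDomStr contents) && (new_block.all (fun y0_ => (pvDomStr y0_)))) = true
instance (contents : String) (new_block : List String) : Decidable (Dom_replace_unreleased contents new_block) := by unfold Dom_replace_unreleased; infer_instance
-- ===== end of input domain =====

-- B replaces A's two index scans plus list slicing by a single forward pass over the lines
-- (copy / emit / skip / copy phases); same cost class, different decomposition (objective: alternative).

-- ===== PORT A =====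
-- shared line predicates (the same tests both Pythons perform verbatim)
def pvMarker (line : String) : Bool := PySem.Str.lower (PySem.Str.strip line) == "## [unreleased]"
def pvHeader (line : String) : Bool := PySem.Str.startswith line "## ["

-- body of A: lines -> new_lines (the try/except start search, the end scan, the slice assembly)
def aLines (lines0 nb : List String) : List String :=
  let lsp : List String × Int :=
    match (PySem.List.enumerate lines0).find? (fun q => pvMarker q.2) with
    | some q => (lines0, q.1)
    | none =>
        let l1 := if lines0 ≠ [] ∧ lines0.getLast? ≠ some "" then lines0 ++ [""] else lines0
        let l2 := l1 ++ ["## [Unreleased]"]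
        (l2, (l2.length : Int) - 1)
  let lines := lsp.1
  let start := lsp.2
  let endI : Int :=
    match (PySem.List.pyRange (start + 1) (lines.length : Int)).find?
        (fun j => pvHeader ((PySem.List.pyGet? lines j).getD "")) with
    | some j => j
    | none => (lines.length : Int)
  PySem.List.slice lines none (some (start + 1)) ++ [""] ++ nb
    ++ PySem.List.slice lines (some endI) none

def replace_unreleased (contents : String) (new_block : List String) : String :=
  PySem.Str.rstrip (PySem.Str.join "\n" (aLines (PySem.Str.splitlines contents) new_block)) ++ "\n"

-- ===== PORT B =====
-- tail phase of Source B: skip old body lines until a '## [' header, then copy everything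
def bTail : Bool → List String → List String → List String
  | _, out, [] => out
  | true, out, l :: rest =>
      if pvHeader l then bTail false (out ++ [l]) rest else bTail true out rest
  | false, out, l :: rest => bTail false (out ++ [l]) rest

-- seek phase of Source B: copy lines until the unreleased marker; on success emit blank line + new block
-- and hand over to bTail; at the end of input replicate A's append path
def bSeek (nb : List String) : List String → List String → List String
  | out, [] =>
      let out1 := if out ≠ [] ∧ out.getLast? ≠ some "" then out ++ [""] else out
      (out1 ++ ["## [Unreleased]"]) ++ "" :: nb
  | out, l :: rest =>
      if pvMarker l then bTail true ((out ++ [l]) ++ "" :: nb) rest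
      else bSeek nb (out ++ [l]) rest

def replace_unreleased_alt (contents : String) (new_block : List String) : String :=
  PySem.Str.rstrip (PySem.Str.join "\n" (bSeek new_block [] (PySem.Str.splitlines contents))) ++ "\n"

-- ===== PRECONDITION & SPEC =====
def Spec_replace_unreleased (contents : String) (new_block : List String) (out : String) : Prop := out = replace_unreleased_alt contents new_block
instance (contents : String) (new_block : List String) (out : String) : Decidable (Spec_replace_unreleased contents new_block out) := by unfold Spec_replace_unreleased; infer_instance

-- ===== CLAIM (what is proved, stated in full; the proofs are below) =====
def Claim_equal_replace_unreleased : Prop := ∀ (contents : String) (new_block : List String), Dom_replace_unreleased contents new_block → Spec_replace_unreleased contents new_block (replace_unreleased contents new_block)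

-- ===== LEMMAS AND PROOFS =====

-- common specification both list computations are reduced to
def specList (nb ls : List String) : List String :=
  match ls.findIdx? pvMarker with
  | some i => ls.take (i+1) ++ "" :: nb ++ (ls.drop (i+1)).dropWhile (fun x => !pvHeader x)
  | none => (if ls ≠ [] ∧ ls.getLast? ≠ some "" then ls ++ [""] else ls) ++ "## [Unreleased]" :: "" :: nb

theorem bTail_false (out ls : List String) : bTail false out ls = out ++ ls := by
  induction ls generalizing out with
  | nil => simp [bTail]
  | cons l rest ih => simp [bTail, ih]

theorem bTail_true (out ls : List String) :
    bTail true out ls = out ++ ls.dropWhile (fun x => !pvHeader x) := by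
  induction ls generalizing out with
  | nil => simp [bTail]
  | cons l rest ih =>
      simp only [bTail, List.dropWhile_cons]
      by_cases h : pvHeader l
      · simp [h, bTail_false]
      · simp [h, ih]

theorem seek_spec (nb : List String) (ls out : List String) :
    bSeek nb out ls =
      match ls.findIdx? pvMarker with
      | some i => out ++ (ls.take (i+1) ++ "" :: nb ++ (ls.drop (i+1)).dropWhile (fun x => !pvHeader x))
      | none => (if out ++ ls ≠ [] ∧ (out ++ ls).getLast? ≠ some "" then (out ++ ls) ++ [""] else out ++ ls) ++ "## [Unreleased]" :: "" :: nb := by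
  induction ls generalizing out with
  | nil => simp [bSeek]
  | cons l rest ih =>
      simp only [bSeek, List.findIdx?_cons]
      by_cases h : pvMarker l
      · simp only [h, if_true]
        rw [bTail_true]
        simp
      · rw [if_neg (by simp [h]), ih (out ++ [l])]
        simp only [h, Bool.false_eq_true, if_false]
        cases hf : rest.findIdx? pvMarker with
        | some i => simp
        | none => simp

theorem bSeek_eq_spec (nb ls : List String) : bSeek nb [] ls = specList nb ls := by
  rw [seek_spec, specList]
  cases ls.findIdx? pvMarker <;> simp

theorem enumFind (f : String → Bool) (ls : List String) (k : Int) :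
    ((PySem.List.enumerate ls k).find? (fun q => f q.2)).map Prod.fst
      = (ls.findIdx? f).map (fun i => k + (i : Int)) := by
  induction ls generalizing k with
  | nil => simp [PySem.List.enumerate_nil]
  | cons l rest ih =>
      rw [PySem.List.enumerate_cons, List.findIdx?_cons, List.find?_cons]
      by_cases h : f l
      · simp [h]
      · simp only [h, Bool.false_eq_true, if_false]
        rw [ih (k+1)]
        cases rest.findIdx? f <;> simp <;> ring

theorem endScan (ls : List String) (k s : Nat) (hk : ls.length ≤ s + k) :
    PySem.List.slice ls
      (some (match (PySem.List.pyRange (s : Int) (ls.length : Int)).find?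
          (fun j => pvHeader ((PySem.List.pyGet? ls j).getD "")) with
        | some j => j
        | none => (ls.length : Int))) none
      = (ls.drop s).dropWhile (fun x => !pvHeader x) := by
  induction k generalizing s with
  | zero =>
      rw [PySem.List.pyRange_one_eq_nil (by exact_mod_cast hk)]
      rw [List.drop_eq_nil_of_le (by omega)]
      simp [PySem.List.slice_from_natCast]
  | succ k ih =>
      by_cases hs : ls.length ≤ s
      · rw [PySem.List.pyRange_one_eq_nil (by exact_mod_cast hs)]
        rw [List.drop_eq_nil_of_le hs]
        simp [PySem.List.slice_from_natCast]
      · have hs' : s < ls.length := by omega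
        rw [PySem.List.pyRange_one_cons (by exact_mod_cast hs')]
        rw [List.find?_cons]
        have hred : pvHeader ((PySem.List.pyGet? ls (s : Int)).getD "") = pvHeader ls[s] := by
          rw [PySem.List.pyGet?_natCast, List.getElem?_eq_getElem hs', Option.getD_some]
        rw [hred, List.drop_eq_getElem_cons hs', List.dropWhile_cons]
        by_cases h : pvHeader ls[s]
        · simp only [h, Bool.not_true, Bool.false_eq_true, if_false]
          rw [PySem.List.slice_from_natCast, List.drop_eq_getElem_cons hs']
        · simp only [h, Bool.not_false, if_true]
          have hc : ((s : Int) + 1) = ((s + 1 : Nat) : Int) := by push_cast; ring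
          rw [hc, ih (s + 1) (by omega)]

theorem aList_eq_spec (nb ls : List String) : aLines ls nb = specList nb ls := by
  have he := enumFind pvMarker ls 0
  rw [aLines, specList]
  cases hf : ls.findIdx? pvMarker with
  | none =>
      rw [hf] at he
      have hnone : (PySem.List.enumerate ls 0).find? (fun q => pvMarker q.2) = none := by
        simpa using he
      simp only [hnone]
      -- the appended-marker branch: start+1 = length, the end scan range is empty
      generalize (if ls ≠ [] ∧ ls.getLast? ≠ some "" then ls ++ [""] else ls) = l1
      have hL : (((l1 ++ ["## [Unreleased]"]).length : Int) - 1 + 1)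
          = ((l1 ++ ["## [Unreleased]"]).length : Int) := by ring
      rw [hL, PySem.List.pyRange_one_eq_nil (le_refl _)]
      simp only [List.find?_nil]
      rw [PySem.List.slice_to_natCast, PySem.List.slice_from_natCast, List.take_length,
        List.drop_length]
      simp
  | some i =>
      rw [hf] at he
      obtain ⟨q, hq, hq1⟩ : ∃ q, (PySem.List.enumerate ls 0).find? (fun q => pvMarker q.2) = some q ∧ q.1 = (i : Int) := by
        cases hfind : (PySem.List.enumerate ls 0).find? (fun q => pvMarker q.2) with
        | none => rw [hfind] at he; simp at he
        | some q => rw [hfind] at he; simp at he; exact ⟨q, rfl, he⟩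
      rw [hq]
      simp only []
      have hs1 : q.1 + 1 = ((i + 1 : Nat) : Int) := by rw [hq1]; push_cast; ring
      rw [hs1, PySem.List.slice_to_natCast]
      rw [endScan ls ls.length (i+1) (by omega)]
      simp

theorem replace_eq (contents : String) (new_block : List String) :
    replace_unreleased contents new_block = replace_unreleased_alt contents new_block := by
  rw [replace_unreleased, replace_unreleased_alt, bSeek_eq_spec, aList_eq_spec]

-- ===== VERDICT (by name: the statement is the Claim_ definition above) =====
theorem replace_unreleased_spec : Claim_equal_replace_unreleased := by
  intro contents new_block _
  exact replace_eq contents new_block
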